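-- pv_equiv track=rewrite | github.com/brookslybrand/CS313E | CodingBat/Logic-2/lucky_sum.py | lucky_sum
-- ===== SOURCE A (Python) =====
-- def lucky_sum(a, b, c):
--   '''
--   sum the numbers expect for an 13s and numbers following a of in the list
--   '''
--   ints = [a, b, c]
--   sum = 0
--   for x in ints:
--     if (x == 13):
--       break
--     else:
--       sum = sum + x
--
--   return sum
-- ===== SOURCE B (Python) =====
-- def lucky_sum(a, b, c):
--     if a == 13:
--         return 0
--     if b == 13:
--         return a
--     if c == 13:
--         return a + b
--     return a + b + c
-- ===== Notes on version B (the rewrite author's own statement) =====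
-- stated objective: simpler
-- what changed: Replaces the list build and break-at-13 loop with a straight-line cascade of guarded early returns and no accumulator.
import Mathlib
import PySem

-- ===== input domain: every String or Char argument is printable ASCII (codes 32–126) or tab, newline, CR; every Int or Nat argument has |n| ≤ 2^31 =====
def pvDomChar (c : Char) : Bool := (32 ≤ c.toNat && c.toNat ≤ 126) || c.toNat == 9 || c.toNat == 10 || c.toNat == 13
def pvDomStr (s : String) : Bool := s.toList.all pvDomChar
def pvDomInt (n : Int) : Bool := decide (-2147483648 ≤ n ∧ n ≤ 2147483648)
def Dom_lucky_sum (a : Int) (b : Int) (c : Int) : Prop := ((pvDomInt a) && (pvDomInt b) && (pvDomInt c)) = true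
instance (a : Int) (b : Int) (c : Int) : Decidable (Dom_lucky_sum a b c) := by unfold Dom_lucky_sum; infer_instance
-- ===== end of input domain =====

-- B replaces the list-and-break loop with a cascade of guarded early returns (objective: simpler).

-- ===== PORT A =====
-- A's loop with `break`: structural recursion over the list, stopping when a 13 is met.
def luckyLoop (sum : Int) : List Int → Int
  | [] => sum
  | x :: rest => if x == 13 then sum else luckyLoop (sum + x) rest

def lucky_sum (a : Int) (b : Int) (c : Int) : Int :=
  luckyLoop 0 [a, b, c]

-- ===== PORT B =====
def lucky_sum_alt (a : Int) (b : Int) (c : Int) : Int :=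
  if a == 13 then 0
  else if b == 13 then a
  else if c == 13 then a + b
  else a + b + c

-- ===== PRECONDITION & SPEC =====
def Spec_lucky_sum (a : Int) (b : Int) (c : Int) (out : Int) : Prop := out = lucky_sum_alt a b c
instance (a : Int) (b : Int) (c : Int) (out : Int) : Decidable (Spec_lucky_sum a b c out) := by unfold Spec_lucky_sum; infer_instance

-- ===== CLAIM (what is proved, stated in full; the proofs are below) =====
def Claim_equal_lucky_sum : Prop := ∀ (a : Int) (b : Int) (c : Int), Dom_lucky_sum a b c → Spec_lucky_sum a b c (lucky_sum a b c)

-- ===== LEMMAS AND PROOFS =====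

-- ===== VERDICT (by name: the statement is the Claim_ definition above) =====
theorem lucky_sum_spec : Claim_equal_lucky_sum := by
  intro a b c _
  unfold Spec_lucky_sum lucky_sum lucky_sum_alt
  simp only [luckyLoop]
  split_ifs <;> simp_all <;> omega
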